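-- pv_equiv track=rewrite | github.com/VDNT11NULL/Hyper-KB | curator_LLM.py | _fix_entity_classification
-- ===== SOURCE A (Python) =====
-- def _fix_entity_classification(data: dict) -> dict:
--     """Post-process to fix common entity misclassifications"""
--     entities = data.get("entities", {})
--
--     # Common person indicators
--     person_indicators = ["et al.", "dr.", "prof.", "mr.", "ms.", "mrs."]
--
--     # Move misclassified persons from MISC to PERSON
--     misc_items = entities.get("MISC", [])
--     persons = entities.get("PERSON", [])
--
--     items_to_move = []
--     for item in misc_items:
--         item_lower = item.lower()
--         # Check if it contains person indicators
--         if any(indicator in item_lower for indicator in person_indicators):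
--             items_to_move.append(item)
--             persons.append(item)
--
--     # Remove moved items from MISC
--     entities["MISC"] = [item for item in misc_items if item not in items_to_move]
--     entities["PERSON"] = persons
--
--     # Common model/product names that should stay in MISC
--     # (GPT-3, GPT-4, Claude, BERT, etc. are correctly in MISC)
--
--     data["entities"] = entities
--     return data
-- ===== SOURCE B (Python) =====
-- def _fix_entity_classification(data: dict) -> dict:
--     """Post-process to fix common entity misclassifications (single partitioning pass)."""
--     entities = data.get("entities", {})
--
--     person_indicators = ["et al.", "dr.", "prof.", "mr.", "ms.", "mrs."]
--
--     persons = entities.get("PERSON", [])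
--     new_misc = []
--     for item in entities.get("MISC", []):
--         low = item.lower()
--         if any(ind in low for ind in person_indicators):
--             persons.append(item)
--         else:
--             new_misc.append(item)
--
--     entities["MISC"] = new_misc
--     entities["PERSON"] = persons
--     data["entities"] = entities
--     return data
-- ===== Notes on version B (the rewrite author's own statement) =====
-- stated objective: simpler
-- what changed: Replaces A's build-items_to_move-then-filter-by-membership (two passes over MISC plus an inner list-membership rescan) with one partitioning pass that routes each MISC item directly to persons or new_misc.
import Mathlib
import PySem

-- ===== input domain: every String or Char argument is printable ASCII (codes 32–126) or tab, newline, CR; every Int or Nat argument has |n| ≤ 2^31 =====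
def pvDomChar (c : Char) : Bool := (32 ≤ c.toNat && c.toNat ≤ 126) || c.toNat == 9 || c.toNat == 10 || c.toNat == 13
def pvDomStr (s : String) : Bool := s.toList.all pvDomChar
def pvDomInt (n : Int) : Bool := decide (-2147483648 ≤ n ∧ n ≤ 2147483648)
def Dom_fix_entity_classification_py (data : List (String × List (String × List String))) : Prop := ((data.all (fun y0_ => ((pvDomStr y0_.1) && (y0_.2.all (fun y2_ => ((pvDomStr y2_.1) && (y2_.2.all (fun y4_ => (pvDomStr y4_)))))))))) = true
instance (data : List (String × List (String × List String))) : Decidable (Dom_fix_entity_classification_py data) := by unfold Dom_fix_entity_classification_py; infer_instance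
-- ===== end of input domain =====

-- B replaces A's build-items_to_move-then-filter-by-membership with a single partitioning
-- pass over MISC (objective: simpler). Equivalence is about the returned dict value; both
-- Pythons mutate data/entities/persons in place in the same way.


-- ===== PORT A =====
def pyPersonIndicators : List String := ["et al.", "dr.", "prof.", "mr.", "ms.", "mrs."]

def fix_entity_classification_py (data : List (String × List (String × List String))) : List (String × List (String × List String)) :=
  let d := PySem.Dict.ofList data
  let entities := PySem.Dict.ofList (d.getD "entities" [])
  let misc_items := entities.getD "MISC" []
  let persons := entities.getD "PERSON" []
  -- for item in misc_items: if any(indicator in item.lower() ...): items_to_move.append(item); persons.append(item)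
  let st := misc_items.foldl (fun (acc : List String × List String) item =>
      let item_lower := PySem.Str.lower item
      if pyPersonIndicators.any (fun ind => PySem.Str.isIn ind item_lower) then
        (acc.1 ++ [item], acc.2 ++ [item])
      else acc) ([], persons)
  let items_to_move := st.1
  let persons := st.2
  let entities := entities.insert "MISC" (misc_items.filter (fun item => !(items_to_move.contains item)))
  let entities := entities.insert "PERSON" persons
  (d.insert "entities" entities.items).items

-- ===== PORT B =====
def altPersonIndicators : List String := ["et al.", "dr.", "prof.", "mr.", "ms.", "mrs."]

def altIsPerson (item : String) : Bool :=
  altPersonIndicators.any (fun ind => PySem.Str.isIn ind (PySem.Str.lower item))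

def fix_entity_classification_py_alt (data : List (String × List (String × List String))) : List (String × List (String × List String)) :=
  let d := PySem.Dict.ofList data
  let entities := PySem.Dict.ofList (d.getD "entities" [])
  let persons := entities.getD "PERSON" []
  -- one pass: route each MISC item either to persons or to new_misc
  let st := (entities.getD "MISC" []).foldl (fun (acc : List String × List String) item =>
      if altIsPerson item then (acc.1, acc.2 ++ [item]) else (acc.1 ++ [item], acc.2)) ([], persons)
  (d.insert "entities" (((entities.insert "MISC" st.1).insert "PERSON" st.2).items)).items

-- ===== PRECONDITION & SPEC =====
def Spec_fix_entity_classification_py (data : List (String × List (String × List String))) (out : List (String × List (String × List String))) : Prop := out = fix_entity_classification_py_alt data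
instance (data : List (String × List (String × List String))) (out : List (String × List (String × List String))) : Decidable (Spec_fix_entity_classification_py data out) := by unfold Spec_fix_entity_classification_py; infer_instance

-- ===== CLAIM (what is proved, stated in full; the proofs are below) =====
def Claim_equal_fix_entity_classification_py : Prop := ∀ (data : List (String × List (String × List String))), Dom_fix_entity_classification_py data → Spec_fix_entity_classification_py data (fix_entity_classification_py data)

-- ===== LEMMAS AND PROOFS =====

-- A's loop body tests the same condition as B's altIsPerson (same literal indicator list).
theorem bodyA_eq :
    (fun (acc : List String × List String) item =>
      let item_lower := PySem.Str.lower item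
      if pyPersonIndicators.any (fun ind => PySem.Str.isIn ind item_lower) then
        (acc.1 ++ [item], acc.2 ++ [item])
      else acc)
    = (fun (acc : List String × List String) item =>
      if altIsPerson item then (acc.1 ++ [item], acc.2 ++ [item]) else acc) := rfl

-- A's accumulation loop: items_to_move is the matching items, persons gets them appended.
theorem foldA_eq (misc : List String) (m0 p0 : List String) :
    misc.foldl (fun (acc : List String × List String) item =>
      if altIsPerson item then (acc.1 ++ [item], acc.2 ++ [item]) else acc) (m0, p0)
    = (m0 ++ misc.filter altIsPerson, p0 ++ misc.filter altIsPerson) := by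
  induction misc generalizing m0 p0 with
  | nil => simp
  | cons x xs ih =>
    rw [List.foldl_cons, List.filter_cons]
    by_cases h : altIsPerson x
    · rw [if_pos h, if_pos h, ih]
      simp [List.append_assoc]
    · rw [if_neg h, if_neg (by simpa using h), ih]

-- B's partitioning loop.
theorem foldB_eq (misc : List String) (m0 p0 : List String) :
    misc.foldl (fun (acc : List String × List String) item =>
      if altIsPerson item then (acc.1, acc.2 ++ [item]) else (acc.1 ++ [item], acc.2)) (m0, p0)
    = (m0 ++ misc.filter (fun i => !altIsPerson i), p0 ++ misc.filter altIsPerson) := by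
  induction misc generalizing m0 p0 with
  | nil => simp
  | cons x xs ih =>
    rw [List.foldl_cons, List.filter_cons, List.filter_cons]
    by_cases h : altIsPerson x
    · rw [if_pos h, if_neg (show ¬ (!altIsPerson x) = true by simp [h]), if_pos h, ih]
      simp [List.append_assoc]
    · rw [if_neg h, if_pos (show (!altIsPerson x) = true by simp [h]), if_neg h, ih]
      simp [List.append_assoc]

-- Filtering by non-membership in the matching items equals filtering by non-match.
theorem filter_not_mem_eq (misc : List String) :
    misc.filter (fun item => !((misc.filter altIsPerson).contains item))
    = misc.filter (fun i => !altIsPerson i) := by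
  apply List.filter_congr
  intro x hx
  by_cases h : altIsPerson x
  · simp [List.mem_filter, hx, h]
  · simp [List.mem_filter, hx, h]

-- ===== VERDICT (by name: the statement is the Claim_ definition above) =====
theorem fix_entity_classification_py_spec : Claim_equal_fix_entity_classification_py := by
  intro data _
  unfold Spec_fix_entity_classification_py fix_entity_classification_py fix_entity_classification_py_alt
  rw [bodyA_eq]
  simp only [foldA_eq, foldB_eq, List.nil_append]
  rw [filter_not_mem_eq]
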